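-- pv_equiv track=rewrite | github.com/loickengit/O_NJU_JK | 广度优先遍历图/广度优先遍历图.py | solve
-- ===== SOURCE A (Python) =====
-- import collections
--
-- def solve(matrix, s):
--     N = len(matrix)
--     graph = [[] for _ in range(N)]
--     for i in range(N):
--         for j in range(i):
--             if matrix[i][j] == 1:
--                 graph[i].append(j)
--                 graph[j].append(i)
--
--     s = ord(s) - ord('a')
--     q = collections.deque([s])
--     res = []
--     seen = {s}
--     while q:
--         node = q.popleft()
--         res.append(node)
--         for nx in graph[node]:
--             if nx not in seen:
--                 q.append(nx)
--                 seen.add(nx)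
--     return [chr(ord('a') + k) for k in res]
-- ===== SOURCE B (Python) =====
-- import collections
--
-- def solve(matrix, s):
--     N = len(matrix)
--     start = ord(s) - ord('a')
--     q = collections.deque([start])
--     res = []
--     seen = {start}
--     while q:
--         node = q.popleft()
--         res.append(node)
--         for j in range(N):
--             if j < node:
--                 edge = matrix[node][j] == 1
--             elif node < j:
--                 edge = matrix[j][node] == 1
--             else:
--                 edge = False
--             if edge:
--                 if j not in seen:
--                     q.append(j)
--                     seen.add(j)
--     return [chr(ord('a') + k) for k in res]
-- ===== Notes on version B (the rewrite author's own statement) =====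
-- stated objective: simpler
-- what changed: B drops A's precomputed adjacency-list table entirely and, when a node is popped from the BFS queue, finds its neighbors by one inline ascending scan of the matrix (lower-triangle row entries for j<node, column entries for j>node), which reproduces A's neighbor order.
-- outside the precondition, e.g. on solve([[0, 0], [1, 0]], '`'): A returns ['`', 'a', 'b'], B returns ['`']
import Mathlib
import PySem

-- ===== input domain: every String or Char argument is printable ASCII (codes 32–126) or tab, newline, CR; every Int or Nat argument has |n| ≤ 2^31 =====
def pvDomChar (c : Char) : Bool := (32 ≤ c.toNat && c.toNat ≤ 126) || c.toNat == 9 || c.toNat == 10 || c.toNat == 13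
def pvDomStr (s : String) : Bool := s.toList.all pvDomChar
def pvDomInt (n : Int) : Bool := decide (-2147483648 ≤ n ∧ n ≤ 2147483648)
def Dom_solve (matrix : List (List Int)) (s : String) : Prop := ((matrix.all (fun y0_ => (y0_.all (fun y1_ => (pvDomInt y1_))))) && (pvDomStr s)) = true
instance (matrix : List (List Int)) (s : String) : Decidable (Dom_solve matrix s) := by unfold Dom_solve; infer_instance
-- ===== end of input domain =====

-- B replaces A's precomputed adjacency-list table with an inline on-demand scan of the
-- matrix when expanding each popped BFS node (simpler: no table to build and keep updated).

-- matrix[i][j] (total form; every access is in range under Pre_solve)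
def pvMat (matrix : List (List Int)) (i j : Nat) : Int := (matrix.getD i []).getD j 0

-- shared BFS visit step: `if nx not in seen: q.append(nx); seen.add(nx)` (identical line in A and B)
def pvVisit (p : List Nat × PySem.Set Nat) (nx : Nat) : List Nat × PySem.Set Nat :=
  if nx ∈ p.2 then p else (p.1 ++ [nx], PySem.Set.add p.2 nx)

-- ===== PORT A =====
-- inner body of A's table build: `if matrix[i][j]==1: graph[i].append(j); graph[j].append(i)`
def pvAddEdge (matrix : List (List Int)) (i : Nat) (g : List (List Nat)) (j : Nat) : List (List Nat) :=
  if pvMat matrix i j = 1 then (g.modify i (· ++ [j])).modify j (· ++ [i]) else g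

def pvOuter (matrix : List (List Int)) (g : List (List Nat)) (i : Nat) : List (List Nat) :=
  (List.range i).foldl (pvAddEdge matrix i) g

def pvBuild (matrix : List (List Int)) (N : Nat) : List (List Nat) :=
  (List.range N).foldl (pvOuter matrix) (List.replicate N [])

-- A's while loop; fuel N suffices: every enqueued node is distinct (guarded by `seen`)
def pvBfsA (graph : List (List Nat)) : Nat → List Nat → PySem.Set Nat → List Nat → List Nat
  | 0, _, _, res => res
  | _ + 1, [], _, res => res
  | fuel + 1, node :: qt, seen, res =>
      let p := (graph.getD node []).foldl pvVisit (qt, seen)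
      pvBfsA graph fuel p.1 p.2 (res ++ [node])

def solve (matrix : List (List Int)) (s : String) : List String :=
  (pvBfsA (pvBuild matrix matrix.length) matrix.length [(s.toList.headD 'a').toNat - 97]
      (PySem.Set.ofList [(s.toList.headD 'a').toNat - 97]) []).map
    (fun k => String.ofList [Char.ofNat (97 + k)])

-- ===== PORT B =====
-- B's inline edge test for the popped node: matrix[node][j] for j<node, matrix[j][node] for j>node
def pvEdge (matrix : List (List Int)) (node j : Nat) : Bool :=
  if j < node then decide (pvMat matrix node j = 1)
  else if node < j then decide (pvMat matrix j node = 1)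
  else false

def pvBfsB (matrix : List (List Int)) (N : Nat) : Nat → List Nat → PySem.Set Nat → List Nat → List Nat
  | 0, _, _, res => res
  | _ + 1, [], _, res => res
  | fuel + 1, node :: qt, seen, res =>
      let p := (List.range N).foldl
        (fun p j => if pvEdge matrix node j then pvVisit p j else p) (qt, seen)
      pvBfsB matrix N fuel p.1 p.2 (res ++ [node])

def solve_alt (matrix : List (List Int)) (s : String) : List String :=
  (pvBfsB matrix matrix.length matrix.length [(s.toList.headD 'a').toNat - 97]
      (PySem.Set.ofList [(s.toList.headD 'a').toNat - 97]) []).map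
    (fun k => String.ofList [Char.ofNat (97 + k)])

-- ===== PRECONDITION & SPEC =====
-- Pre_solve = the natural domain: s is a single letter naming one of the N vertices
-- ('a' … chr(96+N)) and every matrix row i has the ≥ i entries A's build loop reads.
-- It excludes (a) ragged/short rows and s with ord(s)-97 ∉ [-N,N), where Python A raises
-- (IndexError/TypeError), and (b) start letters below 'a' with -N ≤ ord(s)-97 < 0, where A
-- returns a traversal only via negative-index wraparound into graph[] — outside the task's
-- natural domain (the start must name a vertex); B does its natural scan there instead.
def Pre_solve (matrix : List (List Int)) (s : String) : Prop :=
  s.toList.length = 1 ∧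
  (s.toList.all (fun c => decide (97 ≤ c.toNat) && decide (c.toNat - 97 < matrix.length)) = true) ∧
  (∀ i < matrix.length, i ≤ (matrix.getD i []).length)
instance (matrix : List (List Int)) (s : String) : Decidable (Pre_solve matrix s) := by
  unfold Pre_solve; infer_instance

def pvWitness_solve : List (List Int) × String := ([[0, 0], [1, 0]], "a")

def Spec_solve (matrix : List (List Int)) (s : String) (out : List String) : Prop := out = solve_alt matrix s
instance (matrix : List (List Int)) (s : String) (out : List String) : Decidable (Spec_solve matrix s out) := by unfold Spec_solve; infer_instance

-- ===== CLAIM (what is proved, stated in full; the proofs are below) =====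
def Claim_equal_solve : Prop := ∀ (matrix : List (List Int)) (s : String), Dom_solve matrix s → Pre_solve matrix s → Spec_solve matrix s (solve matrix s)

-- ===== LEMMAS AND PROOFS =====

theorem pvGetD_modify (l : List (List Nat)) (i j : Nat) (f : List Nat → List Nat) :
    (l.modify i f).getD j [] = if i = j ∧ j < l.length then f (l.getD j []) else l.getD j [] := by
  simp only [List.getD_eq_getElem?_getD, List.getElem?_modify]
  rcases lt_or_ge j l.length with h | h
  · rw [List.getElem?_eq_getElem h]
    by_cases hij : i = j
    · simp [hij, h]
    · simp [hij, h]
  · rw [List.getElem?_eq_none h]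
    simp [show ¬ (i = j ∧ j < l.length) from fun hc => absurd hc.2 (not_lt.mpr h)]

theorem pvAddEdge_length (matrix : List (List Int)) (i : Nat) (g : List (List Nat)) (j : Nat) :
    (pvAddEdge matrix i g j).length = g.length := by
  unfold pvAddEdge; split_ifs <;> simp

theorem pvInner_length (matrix : List (List Int)) (i : Nat) (js : List Nat) (g : List (List Nat)) :
    (js.foldl (pvAddEdge matrix i) g).length = g.length := by
  induction js generalizing g with
  | nil => rfl
  | cons j js ih => simp [List.foldl_cons, ih, pvAddEdge_length]

-- effect of A's inner loop (over distinct j < i) on each slot of the table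
theorem pvInner_getD (matrix : List (List Int)) (i : Nat) (js : List Nat) (g : List (List Nat))
    (hjs : ∀ j ∈ js, j < i) (hnd : js.Nodup) (hi : i < g.length) (node : Nat) :
    (js.foldl (pvAddEdge matrix i) g).getD node [] =
      if node = i then g.getD i [] ++ js.filter (fun j => decide (pvMat matrix i j = 1))
      else if node ∈ js ∧ pvMat matrix i node = 1 then g.getD node [] ++ [i]
      else g.getD node [] := by
  induction js generalizing g with
  | nil =>
    rcases eq_or_ne node i with rfl | h
    · simp
    · simp [h]
  | cons j js ih =>
    have hj : j < i := hjs j (by simp)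
    have hji : j ≠ i := Nat.ne_of_lt hj
    have hjlen : j < g.length := lt_trans hj hi
    have hrest : ∀ x ∈ js, x < i := fun x hx => hjs x (by simp [hx])
    have hjnot : j ∉ js := (List.nodup_cons.mp hnd).1
    have hnd' : js.Nodup := (List.nodup_cons.mp hnd).2
    rw [List.foldl_cons, ih _ hrest hnd' (by rw [pvAddEdge_length]; exact hi)]
    have hAdd : ∀ m : Nat, (pvAddEdge matrix i g j).getD m [] =
        if pvMat matrix i j = 1 then
          (if m = i then g.getD i [] ++ [j] else if m = j then g.getD j [] ++ [i] else g.getD m [])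
        else g.getD m [] := by
      intro m
      unfold pvAddEdge
      by_cases h1 : pvMat matrix i j = 1
      · rw [if_pos h1, if_pos h1, pvGetD_modify, List.length_modify, pvGetD_modify]
        rcases eq_or_ne m i with rfl | hmi
        · simp [hji, hi]
        · rcases eq_or_ne m j with rfl | hmj
          · simp [hmi, Ne.symm hmi, hjlen]
          · simp [hmi, hmj, Ne.symm hmi, Ne.symm hmj]
      · rw [if_neg h1, if_neg h1]
    rcases eq_or_ne node i with rfl | hni
    · rw [if_pos rfl, if_pos rfl, hAdd]
      by_cases hm : pvMat matrix node j = 1 <;>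
        simp [hm, List.append_assoc]
    · rw [if_neg hni, if_neg hni]
      rcases eq_or_ne node j with rfl | hnj
      · rw [hAdd node]
        by_cases hm : pvMat matrix i node = 1 <;>
          simp [hm, hjnot, hni]
      · rw [hAdd node]
        have hmem : (node ∈ j :: js) = (node ∈ js) := by simp [hnj]
        by_cases hm : pvMat matrix i j = 1 <;>
          simp [hm, hni, hnj, hmem]

-- effect of A's whole build loop, truncated at m outer steps
theorem pvOuterFold_length (matrix : List (List Int)) (l : List Nat) (g : List (List Nat)) :
    (l.foldl (pvOuter matrix) g).length = g.length := by
  induction l generalizing g with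
  | nil => rfl
  | cons a l ih => rw [List.foldl_cons, ih, pvOuter, pvInner_length]

theorem pvOuter_getD (matrix : List (List Int)) (N : Nat) (m : Nat) (hm : m ≤ N) (node : Nat) :
    ((List.range m).foldl (pvOuter matrix) (List.replicate N [])).getD node [] =
      if node < m then
        (List.range node).filter (fun j => decide (pvMat matrix node j = 1)) ++
        (List.range m).filter (fun i => decide (node < i) && decide (pvMat matrix i node = 1))
      else [] := by
  induction m with
  | zero =>
    simp only [List.range_zero, List.foldl_nil, Nat.not_lt_zero, if_false]
    rw [List.getD_eq_getElem?_getD, List.getElem?_replicate]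
    split_ifs <;> rfl
  | succ m ih =>
    have hmN : m < N := hm
    have hm' : m ≤ N := le_of_lt hmN
    rw [List.range_succ, List.foldl_append, List.foldl_cons, List.foldl_nil, pvOuter,
      pvInner_getD matrix m (List.range m) _ (fun j hj => List.mem_range.mp hj)
        (List.nodup_range) (by rw [pvOuterFold_length, List.length_replicate]; exact hmN) node]
    have huppers : (List.range m ++ [m]).filter
        (fun i => decide (node < i) && decide (pvMat matrix i node = 1)) =
        (List.range m).filter (fun i => decide (node < i) && decide (pvMat matrix i node = 1)) ++
        (if node < m ∧ pvMat matrix m node = 1 then [m] else []) := by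
      rw [List.filter_append]
      congr 1
      by_cases h1 : node < m <;> by_cases h2 : pvMat matrix m node = 1 <;>
        simp [h1, h2]
    rcases eq_or_ne node m with rfl | hnm
    · rw [if_pos rfl, ih hm', if_neg (lt_irrefl node), if_pos (Nat.lt_succ_self node), huppers]
      have h0 : (List.range node).filter
          (fun i => decide (node < i) && decide (pvMat matrix i node = 1)) = [] := by
        apply List.filter_eq_nil_iff.mpr
        intro a ha
        simp [Nat.not_lt.mpr (le_of_lt (List.mem_range.mp ha))]
      simp [h0]
    · rw [if_neg hnm]
      rcases lt_or_ge node m with hlt | hge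
      · have hmem : node ∈ List.range m := List.mem_range.mpr hlt
        rw [ih hm', if_pos hlt, if_pos (by omega : node < m + 1), huppers]
        by_cases h2 : pvMat matrix m node = 1
        · rw [if_pos ⟨hmem, h2⟩, if_pos ⟨hlt, h2⟩, List.append_assoc]
        · rw [if_neg (fun h => h2 h.2), if_neg (fun h => h2 h.2), List.append_nil]
      · have hns : ¬ node < m + 1 := by omega
        rw [if_neg (fun h => (by omega : ¬ node < m) (List.mem_range.mp h.1)), ih hm',
          if_neg (by omega : ¬ node < m), if_neg hns]

-- neighbor order: A's table row = B's single ascending matrix scan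
theorem pvFilter_split (matrix : List (List Int)) (node N : Nat) (h : node < N) :
    (List.range N).filter (pvEdge matrix node) =
      (List.range node).filter (fun j => decide (pvMat matrix node j = 1)) ++
      (List.range N).filter (fun i => decide (node < i) && decide (pvMat matrix i node = 1)) := by
  induction N, h using Nat.le_induction with
  | base =>
    rw [List.range_succ, List.filter_append, List.filter_append]
    have h1 : (List.range node).filter (pvEdge matrix node) =
        (List.range node).filter (fun j => decide (pvMat matrix node j = 1)) := by
      apply List.filter_congr
      intro j hj
      simp [pvEdge, List.mem_range.mp hj]
    have h2 : [node].filter (pvEdge matrix node) = [] := by simp [pvEdge]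
    have h3 : (List.range node).filter
        (fun i => decide (node < i) && decide (pvMat matrix i node = 1)) = [] := by
      apply List.filter_eq_nil_iff.mpr
      intro a ha
      simp [Nat.not_lt.mpr (le_of_lt (List.mem_range.mp ha))]
    have h4 : [node].filter
        (fun i => decide (node < i) && decide (pvMat matrix i node = 1)) = [] := by
      simp
    rw [h1, h2, h3, h4]
    simp
  | succ N hN ih =>
    rw [List.range_succ, List.filter_append, List.filter_append, ih, List.append_assoc]
    congr 1
    have hlt : node < N := hN
    rw [List.filter_singleton, List.filter_singleton]
    simp [pvEdge, show ¬ N < node by omega, hlt]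

theorem pvBuild_getD (matrix : List (List Int)) (N node : Nat) (h : node < N) :
    (pvBuild matrix N).getD node [] = (List.range N).filter (pvEdge matrix node) := by
  rw [pvBuild, pvOuter_getD matrix N N (le_refl N) node, if_pos h, pvFilter_split matrix node N h]

theorem pvFold_subset (l : List Nat) (p : List Nat × PySem.Set Nat) :
    ∀ x ∈ (l.foldl pvVisit p).1, x ∈ p.1 ∨ x ∈ l := by
  induction l generalizing p with
  | nil => intro x hx; exact Or.inl hx
  | cons a l ih =>
    intro x hx
    rw [List.foldl_cons] at hx
    rcases ih (pvVisit p a) x hx with h | h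
    · unfold pvVisit at h
      split_ifs at h
      · exact Or.inl h
      · rcases List.mem_append.mp h with h | h
        · exact Or.inl h
        · simp at h; simp [h]
    · simp [h]

theorem pvBfs_eq (matrix : List (List Int)) (N : Nat) (fuel : Nat) :
    ∀ (q : List Nat) (seen : PySem.Set Nat) (res : List Nat), (∀ x ∈ q, x < N) →
      pvBfsA (pvBuild matrix N) fuel q seen res = pvBfsB matrix N fuel q seen res := by
  induction fuel with
  | zero => intro q seen res _; rfl
  | succ fuel ih =>
    intro q seen res hq
    cases q with
    | nil => rfl
    | cons node qt =>
      rw [pvBfsA, pvBfsB]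
      have hfold : ((pvBuild matrix N).getD node []).foldl pvVisit (qt, seen) =
          (List.range N).foldl
            (fun p j => if pvEdge matrix node j then pvVisit p j else p) (qt, seen) := by
        rw [pvBuild_getD matrix N node (hq node (by simp)), List.foldl_filter]
      rw [hfold]
      apply ih
      intro x hx
      rcases pvFold_subset _ _ x (by rw [← List.foldl_filter] at hx; exact hx) with h | h
      · exact hq x (by simp [h])
      · exact List.mem_range.mp (List.mem_filter.mp h).1

-- ===== VERDICT (by name: the statement is the Claim_ definition above) =====
theorem solve_spec : Claim_equal_solve := by
  intro matrix s _ hpre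
  obtain ⟨hlen, hc, -⟩ := hpre
  unfold Spec_solve solve solve_alt
  congr 1
  apply pvBfs_eq
  intro x hx
  simp only [List.mem_singleton] at hx
  subst hx
  obtain ⟨c, hcs⟩ := List.length_eq_one_iff.mp hlen
  rw [hcs] at hc
  simp only [List.all_cons, List.all_nil, Bool.and_true, Bool.and_eq_true, decide_eq_true_eq] at hc
  simp only [hcs, List.headD_cons]
  exact hc.2
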